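-- pv_equiv track=rewrite | github.com/F3liP3L/Complejidad-Algoritmos | exercises/PacMan.py | countMaxMeelConsume
-- ===== SOURCE A (Python) =====
-- def countMaxMeelConsume(road):
--     """
--     Permite contar la mayor cantidad de comida consumida en el recorrido.
--     Args:
--         str road
--     Returns:
--         int
--     """
--     maxInsuredConsume = 0
--     mealInsuredConsume = 0
--     for letter in road:
--         if (letter == 'A'):
--             maxInsuredConsume = max(maxInsuredConsume, mealInsuredConsume)
--             mealInsuredConsume = 0
--         elif (letter == 'o'):
--             mealInsuredConsume += 1
--     maxInsuredConsume = max(maxInsuredConsume, mealInsuredConsume)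
--     return maxInsuredConsume
-- ===== SOURCE B (Python) =====
-- def countMaxMeelConsume(road):
--     return max(seg.count('o') for seg in road.split('A'))
-- ===== Notes on version B (the rewrite author's own statement) =====
-- stated objective: simpler
-- what changed: B replaces A's one-pass state machine (running counter plus running max, reset on separators) by splitting the road on the separator into segments and taking the max of each segment's meal count.
import Mathlib
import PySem

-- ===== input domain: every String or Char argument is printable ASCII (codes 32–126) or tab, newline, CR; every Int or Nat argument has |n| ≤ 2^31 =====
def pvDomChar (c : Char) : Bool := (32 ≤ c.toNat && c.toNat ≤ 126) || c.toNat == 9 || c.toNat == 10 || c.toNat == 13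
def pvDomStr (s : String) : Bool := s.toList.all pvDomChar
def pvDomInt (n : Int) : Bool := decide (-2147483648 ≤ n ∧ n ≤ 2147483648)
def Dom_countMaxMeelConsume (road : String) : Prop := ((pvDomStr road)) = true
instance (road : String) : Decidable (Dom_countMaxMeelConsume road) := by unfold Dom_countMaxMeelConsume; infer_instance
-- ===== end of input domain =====

-- B: instead of A's running counter/max state machine, split the road on 'A' and take the max of per-segment 'o' counts (simpler decomposition; return value only).
-- ===== PORT A =====
def countMaxMeelConsume (road : String) : Int :=
  let st := road.toList.foldl
    (fun (st : Int × Int) letter =>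
      if letter = 'A' then (max st.1 st.2, 0)
      else if letter = 'o' then (st.1, st.2 + 1)
      else st)
    (0, 0)
  max st.1 st.2

-- ===== PORT B =====
-- road.split('A') ported as List.splitOn on the char list (exact for a one-char separator);
-- Python's max over the (always nonempty) list of counts is PySem.List.max?; .getD 0 never fires since splitOn is never empty.
def countMaxMeelConsume_alt (road : String) : Int :=
  let counts : List Int := (road.toList.splitOn 'A').map (fun seg => (seg.count 'o' : Int))
  (PySem.List.max? counts (fun x => x)).getD 0

-- ===== PRECONDITION & SPEC =====
def Spec_countMaxMeelConsume (road : String) (out : Int) : Prop := out = countMaxMeelConsume_alt road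
instance (road : String) (out : Int) : Decidable (Spec_countMaxMeelConsume road out) := by unfold Spec_countMaxMeelConsume; infer_instance

-- ===== CLAIM (what is proved, stated in full; the proofs are below) =====
def Claim_equal_countMaxMeelConsume : Prop := ∀ (road : String), Dom_countMaxMeelConsume road → Spec_countMaxMeelConsume road (countMaxMeelConsume road)

-- ===== LEMMAS AND PROOFS =====
-- g l k = the best segment total seen from here on, with k 'o's already counted in the current segment
def gRun : List Char → Int → Int
  | [], k => k
  | c :: t, k =>
    if c = 'A' then max k (gRun t 0)
    else if c = 'o' then gRun t (k + 1) else gRun t k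

theorem foldl_max_comm (cs : List Int) (a b : Int) :
    cs.foldl max (max a b) = max a (cs.foldl max b) := by
  induction cs generalizing b with
  | nil => simp
  | cons c t ih => simp only [List.foldl_cons, max_assoc, ih]

theorem fold_eq_gRun (l : List Char) (m k : Int) :
    (let st := l.foldl
      (fun (st : Int × Int) letter =>
        if letter = 'A' then (max st.1 st.2, 0)
        else if letter = 'o' then (st.1, st.2 + 1)
        else st) (m, k)
     max st.1 st.2) = max m (gRun l k) := by
  induction l generalizing m k with
  | nil => simp [gRun]
  | cons c t ih =>
    simp only [List.foldl_cons, gRun]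
    split_ifs <;> simp_all [ih, max_assoc]

theorem gRun_eq_split (l : List Char) (k : Int) :
    gRun l k =
      match l.splitOn 'A' with
      | s0 :: rest => (rest.map (fun seg => (seg.count 'o' : Int))).foldl max (k + (s0.count 'o' : Int))
      | [] => 0 := by
  induction l generalizing k with
  | nil => simp [gRun, List.splitOn]
  | cons c t ih =>
    have hne := List.splitOnP_ne_nil (p := (· == 'A')) t
    rcases hs : t.splitOnP (· == 'A') with _ | ⟨s0, rest⟩
    · exact absurd hs hne
    · simp only [gRun, List.splitOn, List.splitOnP_cons] at *
      by_cases h1 : c = 'A'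
      · simp only [h1, beq_self_eq_true, if_pos, ih, hs]
        simp [foldl_max_comm]
      · have hb : (c == 'A') = false := by simp [h1]
        by_cases h2 : c = 'o'
        · simp only [h1, h2, hb, if_false, if_pos, ih, hs, Bool.false_eq_true,
            ite_false, ite_true, List.modifyHead_cons]
          simp [h2, List.count_cons]
          ring_nf
        · simp only [h1, h2, hb, ih, hs, Bool.false_eq_true, ite_false, List.modifyHead_cons]
          simp [List.count_cons, h2]

theorem le_foldl_max_int (cs : List Int) (b : Int) : b ≤ cs.foldl max b := by
  induction cs generalizing b with
  | nil => simp
  | cons c t ih => exact le_trans (le_max_left b c) (ih (max b c))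

-- ===== VERDICT (by name: the statement is the Claim_ definition above) =====
theorem countMaxMeelConsume_spec : Claim_equal_countMaxMeelConsume := by
  intro road _
  unfold Spec_countMaxMeelConsume countMaxMeelConsume countMaxMeelConsume_alt
  rw [fold_eq_gRun, gRun_eq_split]
  have hne := List.splitOnP_ne_nil (p := (· == 'A')) road.toList
  rcases hs : road.toList.splitOnP (· == 'A') with _ | ⟨s0, rest⟩
  · exact absurd hs hne
  · simp only [List.splitOn, hs, List.map_cons, PySem.List.max?_id_cons, Option.getD_some,
      zero_add]
    have h0 : (0:Int) ≤ (rest.map (fun seg => (seg.count 'o' : Int))).foldl max (s0.count 'o' : Int) :=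
      le_trans (by positivity) (le_foldl_max_int _ _)
    omega
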